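-- pv_equiv track=rewrite | github.com/Zaf-Mif/CSEC-CPD-Contests | CSEC ASTU Division I (Core) Contest Round 2/C_Banning_Chat.py | solve
-- ===== SOURCE A (Python) =====
-- def solve(k,x):
--     if x >= k*k:
--         return 2*k - 1
--
--     asc = k*(k+1)//2
--     if x <= asc:
--         lo, hi, ans = 1, k, k
--         while lo <= hi:
--             mid = (lo + hi) // 2
--             if mid*(mid+1)//2 >= x:
--                 ans = mid
--                 hi = mid - 1
--             else:
--                 lo = mid + 1
--         return ans
--     else:
--         y = x - asc
--         lo, hi, p_ans = 1, k - 1, k - 1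
--         while lo <= hi:
--             mid = (lo + hi) // 2
--             if mid*k - mid*(mid+1)//2 >= y:
--                 p_ans = mid
--                 hi = mid - 1
--             else:
--                 lo = mid + 1
--
--         return k + p_ans
-- ===== SOURCE B (Python) =====
-- def _isqrt(n):
--     # Newton's integer square root, for n >= 0
--     r = n
--     while r * r > n:
--         r = (r + n // r) // 2
--     return r
--
-- def solve(k, x):
--     if x >= k*k:
--         return 2*k - 1
--     asc = k*(k+1)//2
--     if x <= asc:
--         # closed-form seed for the least m with m*(m+1)//2 >= x, then O(1) fixup
--         m = (_isqrt(8*x) + 1) // 2 if x >= 1 else 1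
--         m = min(max(m, 1), k)
--         while m < k and m*(m+1)//2 < x:
--             m += 1
--         while m > 1 and (m-1)*m//2 >= x:
--             m -= 1
--         return m
--     y = x - asc
--     # closed-form seed for the least p with p*k - p*(p+1)//2 >= y, then O(1) fixup
--     p = (2*k - 1 - _isqrt((2*k - 1)*(2*k - 1) - 8*y)) // 2
--     p = min(max(p, 1), k - 1)
--     while p < k - 1 and p*k - p*(p+1)//2 < y:
--         p += 1
--     while p > 1 and (p-1)*k - (p-1)*p//2 >= y:
--         p -= 1
--     return k + p
-- ===== Notes on version B (the rewrite author's own statement) =====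
-- stated objective: alternative
-- what changed: Both binary searches are replaced by a closed-form quadratic-formula seed computed with a hand-written Newton integer square root, clamped into the valid range and corrected by short up/down fixup loops around the same >= thresholds.
import Mathlib
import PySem

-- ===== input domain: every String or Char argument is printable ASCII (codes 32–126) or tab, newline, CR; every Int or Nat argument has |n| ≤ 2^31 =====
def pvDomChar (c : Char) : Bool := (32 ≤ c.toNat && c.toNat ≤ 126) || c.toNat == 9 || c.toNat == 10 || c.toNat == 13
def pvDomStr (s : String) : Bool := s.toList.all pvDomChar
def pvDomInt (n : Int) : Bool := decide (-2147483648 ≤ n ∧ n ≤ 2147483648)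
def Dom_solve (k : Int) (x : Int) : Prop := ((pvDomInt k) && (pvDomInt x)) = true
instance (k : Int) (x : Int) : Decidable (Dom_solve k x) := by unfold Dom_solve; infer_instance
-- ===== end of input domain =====

-- B replaces both binary searches with a closed-form Newton-isqrt seed plus short clamped fixup loops (objective: alternative).

-- ===== PORT A =====
def bsLoop (pred : Int → Bool) (lo hi ans : Int) : Int :=
  if h : lo ≤ hi then
    let mid := PySem.Int.floordiv (lo + hi) 2
    if pred mid then bsLoop pred lo (mid - 1) mid
    else bsLoop pred (mid + 1) hi ans
  else ans
termination_by (hi + 1 - lo).toNat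
decreasing_by
  · have := PySem.Int.floordiv_two_mid_bounds h; omega
  · have := PySem.Int.floordiv_two_mid_bounds h; omega

def solve (k : Int) (x : Int) : Int :=
  if x ≥ k * k then 2 * k - 1
  else
    let asc := PySem.Int.floordiv (k * (k + 1)) 2
    if x ≤ asc then
      bsLoop (fun mid => decide (PySem.Int.floordiv (mid * (mid + 1)) 2 ≥ x)) 1 k k
    else
      let y := x - asc
      k + bsLoop (fun mid => decide (mid * k - PySem.Int.floordiv (mid * (mid + 1)) 2 ≥ y)) 1 (k - 1) (k - 1)

-- ===== PORT B =====
-- Newton loop of Source B's _isqrt; the fuel only makes the Lean recursion total: for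
-- n ≥ 0 the iterate r strictly decreases by at least 1 per step, so n.toNat + 2
-- iterations are never exhausted and the fuel branch is unreachable.
def isqrtLoop (n : Int) (r : Int) (fuel : Nat) : Int :=
  match fuel with
  | 0 => r
  | fuel + 1 =>
    if r * r > n then isqrtLoop n (PySem.Int.floordiv (r + PySem.Int.floordiv n r) 2) fuel
    else r

def pyIsqrt (n : Int) : Int := isqrtLoop n n (n.toNat + 2)

-- while m < top and not pred m: m += 1
def upLoop (pred : Int → Bool) (top m : Int) : Int :=
  if h : m < top ∧ pred m = false then upLoop pred top (m + 1) else m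
termination_by (top - m).toNat
decreasing_by omega

-- while 1 < m and pred (m-1): m -= 1
def downLoop (pred : Int → Bool) (m : Int) : Int :=
  if h : 1 < m ∧ pred (m - 1) = true then downLoop pred (m - 1) else m
termination_by m.toNat
decreasing_by omega

def solve_alt (k : Int) (x : Int) : Int :=
  if x ≥ k * k then 2 * k - 1
  else if x ≤ PySem.Int.floordiv (k * (k + 1)) 2 then
    downLoop (fun m => decide (PySem.Int.floordiv (m * (m + 1)) 2 ≥ x))
      (upLoop (fun m => decide (PySem.Int.floordiv (m * (m + 1)) 2 ≥ x)) k
        (min (max (if x ≥ 1 then PySem.Int.floordiv (pyIsqrt (8 * x) + 1) 2 else 1) 1) k))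
  else
    k + downLoop
      (fun p => decide (p * k - PySem.Int.floordiv (p * (p + 1)) 2 ≥ x - PySem.Int.floordiv (k * (k + 1)) 2))
      (upLoop (fun p => decide (p * k - PySem.Int.floordiv (p * (p + 1)) 2 ≥ x - PySem.Int.floordiv (k * (k + 1)) 2)) (k - 1)
        (min (max (PySem.Int.floordiv (2 * k - 1 - pyIsqrt ((2 * k - 1) * (2 * k - 1) - 8 * (x - PySem.Int.floordiv (k * (k + 1)) 2))) 2) 1) (k - 1)))

-- ===== PRECONDITION & SPEC =====
def Spec_solve (k : Int) (x : Int) (out : Int) : Prop := out = solve_alt k x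
instance (k : Int) (x : Int) (out : Int) : Decidable (Spec_solve k x out) := by unfold Spec_solve; infer_instance

-- ===== CLAIM (what is proved, stated in full; the proofs are below) =====
def Claim_equal_solve : Prop := ∀ (k : Int) (x : Int), Dom_solve k x → Spec_solve k x (solve k x)

-- ===== LEMMAS AND PROOFS =====

-- proof-side reference loop: first m in [a, top] with pred m, else dflt
def scanLoop (pred : Int → Bool) (top dflt m : Int) : Int :=
  if _h : m ≤ top then
    if pred m then m else scanLoop pred top dflt (m + 1)
  else dflt
termination_by (top + 1 - m).toNat
decreasing_by omega

lemma scanLoop_of_gt (pred : Int → Bool) (top dflt m : Int) (h : top < m) :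
    scanLoop pred top dflt m = dflt := by
  rw [scanLoop]; simp [not_le.mpr h]

lemma scanLoop_skip (pred : Int → Bool) (top dflt : Int) :
    ∀ a b : Int, a ≤ b → (∀ i, a ≤ i → i < b → pred i = false) →
      scanLoop pred top dflt a = scanLoop pred top dflt b := by
  intro a b hab
  induction hn : (b - a).toNat generalizing a with
  | zero =>
    intro _
    have : a = b := by omega
    rw [this]
  | succ n ih =>
    intro hfalse
    have ha : a < b := by omega
    by_cases htop : a ≤ top
    · rw [scanLoop, dif_pos htop, hfalse a le_rfl ha, if_neg (by simp)]
      exact ih (a + 1) (by omega) (by omega) (fun i h1 h2 => hfalse i (by omega) h2)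
    · rw [scanLoop_of_gt _ _ _ _ (by omega), scanLoop_of_gt _ _ _ _ (by omega)]

lemma bsLoop_eq_scanLoop (pred : Int → Bool) (top dflt : Int)
    (mono : ∀ i j : Int, 1 ≤ i → i ≤ j → j ≤ top → pred i = true → pred j = true) :
    ∀ lo hi ans : Int, 1 ≤ lo → lo ≤ hi + 1 → hi ≤ top →
      ans = scanLoop pred top dflt (hi + 1) →
      bsLoop pred lo hi ans = scanLoop pred top dflt lo := by
  intro lo hi ans h1 h2 h3 hans
  induction hn : (hi + 1 - lo).toNat using Nat.strong_induction_on generalizing lo hi ans with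
  | _ n ih =>
  by_cases hlh : lo ≤ hi
  · have hmid := PySem.Int.floordiv_two_mid_bounds hlh
    rw [bsLoop, dif_pos hlh]
    set mid := PySem.Int.floordiv (lo + hi) 2 with hm
    by_cases hp : pred mid = true
    · rw [if_pos hp]
      refine ih (mid - 1 + 1 - lo).toNat (by omega) lo (mid - 1) mid h1 (by omega) (by omega) ?_ rfl
      rw [show mid - 1 + 1 = mid by ring, scanLoop, dif_pos (by omega), if_pos hp]
    · rw [if_neg hp]
      have : bsLoop pred (mid + 1) hi ans = scanLoop pred top dflt (mid + 1) :=
        ih (hi + 1 - (mid + 1)).toNat (by omega) (mid + 1) hi ans (by omega) (by omega) h3 hans rfl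
      rw [this]
      refine (scanLoop_skip pred top dflt lo (mid + 1) (by omega) ?_).symm
      intro i hi1 hi2
      by_cases hpi : pred i = true
      · exact absurd (mono i mid (by omega) (by omega) (by omega) hpi) hp
      · simpa using hpi
  · rw [bsLoop, dif_neg hlh, hans]
    congr 1
    omega

lemma bsLoop_neg (pred : Int → Bool) (hi ans : Int) (h : hi < 1) :
    bsLoop pred 1 hi ans = ans := by
  rw [bsLoop]; simp [not_le.mpr h]

lemma tri_even (m : Int) : 2 * PySem.Int.floordiv (m * (m + 1)) 2 = m * (m + 1) := by
  have h2 : (0:Int) < 2 := by norm_num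
  have hd : (2:Int) ∣ m * (m + 1) := Int.even_mul_succ_self m |>.two_dvd
  rw [PySem.Int.floordiv_eq_ediv_of_pos h2]
  exact Int.mul_ediv_cancel' hd

lemma branch1_mono (x : Int) (top : Int) :
    ∀ i j : Int, 1 ≤ i → i ≤ j → j ≤ top →
      (decide (PySem.Int.floordiv (i * (i + 1)) 2 ≥ x) = true) →
      (decide (PySem.Int.floordiv (j * (j + 1)) 2 ≥ x) = true) := by
  intro i j h1 h2 _ hp
  rw [decide_eq_true_iff] at hp ⊢
  have ei := tri_even i
  have ej := tri_even j
  nlinarith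

lemma branch2_mono (k y : Int) :
    ∀ i j : Int, 1 ≤ i → i ≤ j → j ≤ k - 1 →
      (decide (i * k - PySem.Int.floordiv (i * (i + 1)) 2 ≥ y) = true) →
      (decide (j * k - PySem.Int.floordiv (j * (j + 1)) 2 ≥ y) = true) := by
  intro i j h1 h2 h3 hp
  rw [decide_eq_true_iff] at hp ⊢
  have ei := tri_even i
  have ej := tri_even j
  nlinarith

-- characterisation of the proof-side scanLoop: its result is the first hit
lemma scanLoop_char (pred : Int → Bool) (top dflt : Int) (htop : pred top = true) :
    ∀ a : Int, a ≤ top →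
      a ≤ scanLoop pred top dflt a ∧ scanLoop pred top dflt a ≤ top ∧
      pred (scanLoop pred top dflt a) = true ∧
      (∀ i, a ≤ i → i < scanLoop pred top dflt a → pred i = false) := by
  intro a ha
  induction hn : (top - a).toNat using Nat.strong_induction_on generalizing a with
  | _ n ih =>
  rw [scanLoop, dif_pos ha]
  by_cases hp : pred a = true
  · rw [if_pos hp]
    exact ⟨le_rfl, ha, hp, fun i h1 h2 => absurd h1 (by omega)⟩
  · rw [if_neg hp]
    have hat : a < top := by
      rcases lt_or_eq_of_le ha with h | h
      · exact h
      · rw [h] at hp; exact absurd htop hp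
    obtain ⟨c1, c2, c3, c4⟩ := ih (top - (a + 1)).toNat (by omega) (a + 1) (by omega) rfl
    refine ⟨by omega, c2, c3, fun i h1 h2 => ?_⟩
    rcases lt_or_ge i (a + 1) with h | h
    · have : i = a := by omega
      rw [this]; simpa using hp
    · exact c4 i h h2

-- characterisation of B's up-loop
lemma upLoop_char (pred : Int → Bool) (top : Int) :
    ∀ m : Int, m ≤ top →
      m ≤ upLoop pred top m ∧ upLoop pred top m ≤ top ∧
      (pred (upLoop pred top m) = true ∨ upLoop pred top m = top) ∧
      (∀ i, m ≤ i → i < upLoop pred top m → pred i = false) := by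
  intro m hm
  induction hn : (top - m).toNat using Nat.strong_induction_on generalizing m with
  | _ n ih =>
  rw [upLoop]
  by_cases hg : m < top ∧ pred m = false
  · rw [dif_pos hg]
    obtain ⟨c1, c2, c3, c4⟩ := ih (top - (m + 1)).toNat (by omega) (m + 1) (by omega) rfl
    refine ⟨by omega, c2, c3, fun i h1 h2 => ?_⟩
    rcases lt_or_ge i (m + 1) with h | h
    · have : i = m := by omega
      rw [this]; exact hg.2
    · exact c4 i h h2
  · rw [dif_neg hg]
    refine ⟨le_rfl, hm, ?_, fun i h1 h2 => absurd h1 (by omega)⟩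
    rcases lt_or_eq_of_le hm with h | h
    · left
      by_cases hp : pred m = true
      · exact hp
      · exact absurd ⟨h, by simpa using hp⟩ hg
    · right; exact h

-- B's down-loop walks down to the least index L with pred true above it
lemma downLoop_eq (pred : Int → Bool) (L : Int) (hL : 1 ≤ L)
    (hfalse : 1 < L → pred (L - 1) = false) :
    ∀ m : Int, L ≤ m → (∀ i, L ≤ i → i < m → pred i = true) →
      downLoop pred m = L := by
  intro m hm
  induction hn : (m - L).toNat using Nat.strong_induction_on generalizing m with
  | _ n ih =>
  intro htrue
  rw [downLoop]
  by_cases hLm : L < m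
  · rw [dif_pos ⟨by omega, htrue (m - 1) (by omega) (by omega)⟩]
    exact ih (m - 1 - L).toNat (by omega) (m - 1) (by omega) rfl
      (fun i h1 h2 => htrue i h1 (by omega))
  · have hmL : m = L := by omega
    rw [hmL]
    by_cases h1 : 1 < L
    · rw [dif_neg (by simp [hfalse h1])]
    · rw [dif_neg (by omega)]

-- B's seeded pipeline computes exactly the first hit of the scan
lemma pipeline_eq_scan (pred : Int → Bool) (top s : Int)
    (hs1 : 1 ≤ s) (hs2 : s ≤ top)
    (mono : ∀ i j : Int, 1 ≤ i → i ≤ j → j ≤ top → pred i = true → pred j = true)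
    (htop : pred top = true) :
    downLoop pred (upLoop pred top s) = scanLoop pred top top 1 := by
  obtain ⟨u1, u2, u3, _⟩ := upLoop_char pred top s hs2
  obtain ⟨s1, s2, s3, s4⟩ := scanLoop_char pred top top htop 1 (by omega)
  set L := scanLoop pred top top 1 with hLdef
  set m1 := upLoop pred top s with hm1
  have hLm1 : L ≤ m1 := by
    rcases u3 with hp | hp
    · by_contra hc
      exact absurd (s4 m1 (by omega) (by omega)) (by simp [hp])
    · omega
  refine downLoop_eq pred L s1 (fun h1 => s4 (L - 1) (by omega) (by omega)) m1 hLm1 ?_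
  intro i hi1 hi2
  exact mono L i s1 hi1 (by omega) s3

lemma upLoop_stop (pred : Int → Bool) (top m : Int) (h : ¬ m < top) :
    upLoop pred top m = m := by
  rw [upLoop]; simp [h]

lemma downLoop_stop (pred : Int → Bool) (m : Int) (h : ¬ 1 < m) :
    downLoop pred m = m := by
  rw [downLoop]; simp [h]

-- ===== VERDICT (by name: the statement is the Claim_ definition above) =====
theorem solve_spec : Claim_equal_solve := by
  intro k x _
  unfold Spec_solve solve solve_alt
  by_cases h1 : x ≥ k * k
  · rw [if_pos h1, if_pos h1]
  · rw [if_neg h1, if_neg h1]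
    set asc := PySem.Int.floordiv (k * (k + 1)) 2 with hasc
    have hasc2 : 2 * asc = k * (k + 1) := tri_even k
    by_cases h2 : x ≤ asc
    · rw [if_pos h2, if_pos h2]
      set pred := fun m => decide (PySem.Int.floordiv (m * (m + 1)) 2 ≥ x) with hpred
      set m0 := if x ≥ 1 then PySem.Int.floordiv (pyIsqrt (8 * x) + 1) 2 else 1 with hm0
      by_cases hk : 1 ≤ k
      · have hpk : pred k = true := by
          simp only [hpred, decide_eq_true_iff]
          exact h2
        have hA : bsLoop pred 1 k k = scanLoop pred k k 1 :=
          bsLoop_eq_scanLoop pred k k (branch1_mono x k) 1 k k le_rfl (by omega) le_rfl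
            (scanLoop_of_gt _ _ _ _ (by omega)).symm
        have hB : downLoop pred (upLoop pred k (min (max m0 1) k)) = scanLoop pred k k 1 :=
          pipeline_eq_scan pred k (min (max m0 1) k) (by omega) (by omega)
            (branch1_mono x k) hpk
        rw [hA, hB]
      · have hs : min (max m0 1) k = k := by omega
        rw [bsLoop_neg _ _ _ (by omega), hs,
          upLoop_stop _ _ _ (by omega), downLoop_stop _ _ (by omega)]
    · rw [if_neg h2, if_neg h2]
      set y := x - asc with hy
      set pred := fun p => decide (p * k - PySem.Int.floordiv (p * (p + 1)) 2 ≥ y) with hpred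
      set p0 := PySem.Int.floordiv (2 * k - 1 - pyIsqrt ((2 * k - 1) * (2 * k - 1) - 8 * y)) 2 with hp0
      show k + bsLoop pred 1 (k - 1) (k - 1) =
        k + downLoop pred (upLoop pred (k - 1) (min (max p0 1) (k - 1)))
      congr 1
      by_cases hk : 2 ≤ k
      · have hpk : pred (k - 1) = true := by
          simp only [hpred, decide_eq_true_iff]
          have e1 := tri_even (k - 1)
          have h1' := lt_of_not_ge h1
          nlinarith
        have hA : bsLoop pred 1 (k - 1) (k - 1) = scanLoop pred (k - 1) (k - 1) 1 :=
          bsLoop_eq_scanLoop pred (k - 1) (k - 1) (branch2_mono k y) 1 (k - 1) (k - 1)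
            le_rfl (by omega) le_rfl (scanLoop_of_gt _ _ _ _ (by omega)).symm
        have hB : downLoop pred (upLoop pred (k - 1) (min (max p0 1) (k - 1))) =
            scanLoop pred (k - 1) (k - 1) 1 :=
          pipeline_eq_scan pred (k - 1) (min (max p0 1) (k - 1)) (by omega) (by omega)
            (branch2_mono k y) hpk
        rw [hA, hB]
      · have hs : min (max p0 1) (k - 1) = k - 1 := by omega
        rw [bsLoop_neg _ _ _ (by omega), hs,
          upLoop_stop _ _ _ (by omega), downLoop_stop _ _ (by omega)]
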